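-- pv_equiv track=rewrite | github.com/tarun02185/Scout | backend/src/guardrails/validator.py | _select_projection
-- ===== SOURCE A (Python) =====
-- def _select_projection(sql: str) -> str:
--     """Return the projection clause (text between SELECT and the matching FROM)."""
--     sql_u = sql.upper()
--     select_idx = sql_u.find("SELECT")
--     if select_idx < 0:
--         return ""
--     # Find FROM at the same nesting depth as the SELECT.
--     depth = 0
--     i = select_idx + len("SELECT")
--     from_idx = -1
--     while i < len(sql):
--         ch = sql[i]
--         if ch == "(":
--             depth += 1
--         elif ch == ")":
--             depth -= 1
--         elif depth == 0 and sql_u[i:i + 4] == "FROM" and (i == 0 or not sql[i - 1].isalnum()):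
--             from_idx = i
--             break
--         i += 1
--     if from_idx < 0:
--         return sql[select_idx + len("SELECT"):]
--     return sql[select_idx + len("SELECT"):from_idx]
-- ===== SOURCE B (Python) =====
-- def _select_projection(sql: str) -> str:
--     """Return the projection clause (text between SELECT and the matching FROM)."""
--     sql_u = sql.upper()
--     select_idx = sql_u.find("SELECT")
--     if select_idx < 0:
--         return ""
--     start = select_idx + len("SELECT")
--     # Find-then-validate: jump between candidate FROM occurrences instead of
--     # walking every character with a running depth counter.
--     pos = start
--     while True:
--         i = sql_u.find("FROM", pos)
--         if i < 0:
--             return sql[start:]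
--         seg = sql[start:i]
--         if seg.count("(") == seg.count(")") and (i == 0 or not sql[i - 1].isalnum()):
--             return seg
--         pos = i + 1
-- ===== Notes on version B (the rewrite author's own statement) =====
-- stated objective: alternative
-- what changed: Replaces A's fused per-character scan that maintains a running parenthesis depth with a find-then-validate loop: str.find jumps between candidate FROM occurrences and each candidate is validated by recounting opening and closing parentheses in the slice before it and checking the left boundary.
import Mathlib
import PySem

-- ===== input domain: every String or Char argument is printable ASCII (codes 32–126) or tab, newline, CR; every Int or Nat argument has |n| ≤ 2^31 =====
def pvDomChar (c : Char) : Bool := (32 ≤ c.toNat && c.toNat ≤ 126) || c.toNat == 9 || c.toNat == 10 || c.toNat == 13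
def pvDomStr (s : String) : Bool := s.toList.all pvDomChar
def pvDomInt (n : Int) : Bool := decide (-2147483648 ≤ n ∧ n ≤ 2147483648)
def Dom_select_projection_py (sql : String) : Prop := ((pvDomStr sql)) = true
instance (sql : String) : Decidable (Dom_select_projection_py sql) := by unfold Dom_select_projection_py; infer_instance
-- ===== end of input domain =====

-- B replaces A's fused per-character depth-tracking scan by a find-then-validate loop:
-- jump between candidate "FROM" occurrences with str.find and validate each by recounting
-- parentheses in the slice; same return value (no mutation, no side effects).

-- ===== PORT A =====
-- while-loop of A: walk every index from select_idx+6, maintaining the running depth;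
-- returns from_idx (or -1), exactly as A's loop leaves it.
def aLoop (s su : List Char) (i : Nat) (depth : Int) : Int :=
  if h : i < s.length then
    let ch := s[i]
    if ch = '(' then aLoop s su (i + 1) (depth + 1)
    else if ch = ')' then aLoop s su (i + 1) (depth - 1)
    else if depth = 0 ∧ PySem.Chars.slice su (some (i : Int)) (some ((i : Int) + 4)) = "FROM".toList
            ∧ (i = 0 ∨ PySem.Chars.isalnum (s.getD (i - 1) ' ') = false) then
      (i : Int)
    else aLoop s su (i + 1) depth
  else -1
termination_by s.length - i

def select_projection_py (sql : String) : String :=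
  let s := sql.toList
  let su := PySem.Chars.upper s
  let selectIdx := PySem.Chars.find su "SELECT".toList
  if selectIdx < 0 then ""
  else
    let start := selectIdx + 6
    let fromIdx := aLoop s su start.toNat 0
    if fromIdx < 0 then String.ofList (PySem.Chars.slice s (some start) none)
    else String.ofList (PySem.Chars.slice s (some start) (some fromIdx))

-- ===== PORT B =====
-- needed by bLoop's termination: a found "FROM" lies at an index in [pos, su.length)
theorem findFrom_FROM_bounds (su : List Char) (pos : Nat)
    (h : ¬ PySem.Chars.findFrom su "FROM".toList (pos : Int) none < 0) :
    pos ≤ (PySem.Chars.findFrom su "FROM".toList (pos : Int) none).toNat ∧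
    (PySem.Chars.findFrom su "FROM".toList (pos : Int) none).toNat < su.length := by
  by_cases hp : pos ≤ su.length
  · have hne : PySem.Chars.findFrom su "FROM".toList (pos : Int) none ≠ -1 := by omega
    obtain ⟨h1, h2, -⟩ := PySem.Chars.findFrom_natCast_spec su "FROM".toList pos hp hne
    have hlen := h2.length_le
    rw [List.length_drop] at hlen
    have h4 : ("FROM".toList).length = 4 := rfl
    rw [h4] at hlen
    omega
  · exfalso
    apply h
    have : PySem.Chars.findFrom su "FROM".toList (pos : Int) none = -1 := by
      simp only [PySem.Chars.findFrom]
      simp only [if_neg (by omega : ¬ (pos : Int) < 0)]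
      rw [if_pos (by omega : (su.length : Int) < (pos : Int))]
    omega

-- while-loop of B: find the next candidate "FROM", validate it by recounting parentheses
-- in sql[start:i] and checking the left boundary; otherwise continue after it.
def bLoop (s su : List Char) (start pos : Nat) : String :=
  let i := PySem.Chars.findFrom su "FROM".toList (pos : Int) none
  if h : i < 0 then String.ofList (PySem.Chars.slice s (some (start : Int)) none)
  else
    let seg := PySem.Chars.slice s (some (start : Int)) (some i)
    if PySem.Chars.count seg "(".toList = PySem.Chars.count seg ")".toList
        ∧ (i.toNat = 0 ∨ PySem.Chars.isalnum (s.getD (i.toNat - 1) ' ') = false) then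
      String.ofList seg
    else bLoop s su start (i.toNat + 1)
termination_by su.length + 1 - pos
decreasing_by
  have := findFrom_FROM_bounds su pos h
  omega

def select_projection_py_alt (sql : String) : String :=
  let s := sql.toList
  let su := PySem.Chars.upper s
  let selectIdx := PySem.Chars.find su "SELECT".toList
  if selectIdx < 0 then ""
  else
    let start := selectIdx + 6
    bLoop s su start.toNat start.toNat

-- ===== PRECONDITION & SPEC =====
def Spec_select_projection_py (sql : String) (out : String) : Prop := out = select_projection_py_alt sql
instance (sql : String) (out : String) : Decidable (Spec_select_projection_py sql out) := by unfold Spec_select_projection_py; infer_instance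

-- ===== CLAIM (what is proved, stated in full; the proofs are below) =====
def Claim_equal_select_projection_py : Prop := ∀ (sql : String), Dom_select_projection_py sql → Spec_select_projection_py sql (select_projection_py sql)

-- ===== LEMMAS AND PROOFS =====

-- Chars.count with a single-character needle is List.count
theorem count_go_single (c : Char) : ∀ (l : List Char) (fuel acc : Nat), l.length ≤ fuel →
    PySem.Chars.count.go [c] fuel l acc = acc + l.count c := by
  intro l
  induction l with
  | nil =>
    intro fuel acc _
    cases fuel <;> simp [PySem.Chars.count.go]
  | cons hd t ih =>
    intro fuel acc hf
    cases fuel with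
    | zero => simp at hf
    | succ f =>
      have ht : t.length ≤ f := by simpa using hf
      by_cases hc : c = hd
      · subst hc
        simp only [PySem.Chars.count.go, List.isPrefixOf]
        simp [ih f (acc + 1) ht]
        omega
      · simp only [PySem.Chars.count.go, List.isPrefixOf]
        simp [Ne.symm hc, hc, ih f acc ht]

theorem count_single (l : List Char) (c : Char) :
    PySem.Chars.count l [c] = l.count c := by
  simp [PySem.Chars.count, count_go_single c l l.length 0 le_rfl]

-- "FROM" occurs as an infix of a suffix iff it is a prefix at some later index
theorem infix_drop_iff (sub su : List Char) (i : Nat) :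
    sub <:+: List.drop i su ↔ ∃ j, i ≤ j ∧ sub <+: List.drop j su := by
  constructor
  · intro h
    obtain ⟨t, hpre, hsuf⟩ := List.infix_iff_prefix_suffix.mp h
    rw [List.suffix_iff_eq_drop, List.drop_drop] at hsuf
    refine ⟨i + ((List.drop i su).length - t.length), by omega, ?_⟩
    rw [← hsuf]
    exact hpre
  · rintro ⟨j, hij, hpre⟩
    have : List.drop j su <:+ List.drop i su := by
      rw [← Nat.sub_add_cancel hij, Nat.add_comm, ← List.drop_drop]
      exact List.drop_suffix _ _
    exact hpre.isInfix.trans this.isInfix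

-- a "FROM" prefix at pos means findFrom returns pos itself
theorem findFrom_at (su : List Char) (pos : Nat) (hp : pos ≤ su.length)
    (h : "FROM".toList <+: List.drop pos su) :
    PySem.Chars.findFrom su "FROM".toList (pos : Int) none = (pos : Int) := by
  have hinf : "FROM".toList <:+: List.drop pos su := (infix_drop_iff _ _ _).mpr ⟨pos, le_rfl, h⟩
  have hne : PySem.Chars.findFrom su "FROM".toList (pos : Int) none ≠ -1 := by
    intro heq
    exact (PySem.Chars.findFrom_natCast_eq_neg_one_iff su "FROM".toList pos hp).mp heq hinf
  obtain ⟨h1, h2, h3⟩ := PySem.Chars.findFrom_natCast_spec su "FROM".toList pos hp hne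
  by_contra hne2
  have hlt : pos < (PySem.Chars.findFrom su "FROM".toList (pos : Int) none).toNat := by omega
  exact h3 pos le_rfl hlt h

-- no "FROM" prefix at pos: findFrom from pos equals findFrom from pos+1
theorem findFrom_skip (su : List Char) (pos : Nat) (hp : pos < su.length)
    (h : ¬ "FROM".toList <+: List.drop pos su) :
    PySem.Chars.findFrom su "FROM".toList (pos : Int) none
      = PySem.Chars.findFrom su "FROM".toList ((pos + 1 : Nat) : Int) none := by
  have hp1 : pos + 1 ≤ su.length := hp
  have hp0 : pos ≤ su.length := by omega
  have hiff : ("FROM".toList <:+: List.drop pos su) ↔ ("FROM".toList <:+: List.drop (pos + 1) su) := by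
    rw [infix_drop_iff, infix_drop_iff]
    constructor
    · rintro ⟨j, hij, hpre⟩
      refine ⟨j, ?_, hpre⟩
      rcases Nat.eq_or_lt_of_le hij with rfl | hlt
      · exact absurd hpre h
      · omega
    · rintro ⟨j, hij, hpre⟩; exact ⟨j, by omega, hpre⟩
  by_cases hc : PySem.Chars.findFrom su "FROM".toList ((pos + 1 : Nat) : Int) none = -1
  · rw [hc]
    rw [PySem.Chars.findFrom_natCast_eq_neg_one_iff su "FROM".toList pos hp0, hiff,
      ← PySem.Chars.findFrom_natCast_eq_neg_one_iff su "FROM".toList (pos + 1) hp1]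
    exact hc
  · have hne : PySem.Chars.findFrom su "FROM".toList (pos : Int) none ≠ -1 := by
      intro heq
      apply hc
      rw [PySem.Chars.findFrom_natCast_eq_neg_one_iff su "FROM".toList (pos + 1) hp1, ← hiff,
        ← PySem.Chars.findFrom_natCast_eq_neg_one_iff su "FROM".toList pos hp0]
      exact heq
    obtain ⟨a1, a2, a3⟩ := PySem.Chars.findFrom_natCast_spec su "FROM".toList pos hp0 hne
    obtain ⟨b1, b2, b3⟩ := PySem.Chars.findFrom_natCast_spec su "FROM".toList (pos + 1) hp1 hc
    have hane : (PySem.Chars.findFrom su "FROM".toList (pos : Int) none).toNat ≠ pos := by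
      intro heq
      rw [heq] at a2
      exact h a2
    have hge : pos + 1 ≤ (PySem.Chars.findFrom su "FROM".toList (pos : Int) none).toNat := by omega
    by_contra hne2
    rcases Nat.lt_or_ge (PySem.Chars.findFrom su "FROM".toList (pos : Int) none).toNat
        (PySem.Chars.findFrom su "FROM".toList ((pos + 1 : Nat) : Int) none).toNat with hlt | hge2
    · exact b3 _ hge hlt a2
    · have : (PySem.Chars.findFrom su "FROM".toList ((pos + 1 : Nat) : Int) none).toNat
          < (PySem.Chars.findFrom su "FROM".toList (pos : Int) none).toNat := by omega
      exact a3 _ (by omega) this b2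

-- past the end there is no "FROM"
theorem findFrom_none_of_ge (su : List Char) (pos : Nat) (hp : su.length ≤ pos) :
    PySem.Chars.findFrom su "FROM".toList (pos : Int) none = -1 := by
  rcases Nat.eq_or_lt_of_le hp with heq | hlt
  · subst heq
    rw [PySem.Chars.findFrom_natCast su "FROM".toList su.length le_rfl]
    rw [List.drop_length]
    have he : PySem.Chars.find [] "FROM".toList = -1 := by decide
    rw [he]
    simp
  · simp only [PySem.Chars.findFrom]
    simp only [if_neg (by omega : ¬ (pos : Int) < 0)]
    rw [if_pos (by omega : (su.length : Int) < (pos : Int))]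

-- if both loops start at the same pos, skipping one non-candidate char keeps bLoop unchanged
theorem bLoop_step (s su : List Char) (start pos : Nat)
    (h : PySem.Chars.findFrom su "FROM".toList (pos : Int) none
       = PySem.Chars.findFrom su "FROM".toList ((pos + 1 : Nat) : Int) none) :
    bLoop s su start pos = bLoop s su start (pos + 1) := by
  conv_lhs => rw [bLoop, h]
  conv_rhs => rw [bLoop]

-- the A-side FROM test is the prefix property
theorem slice_eq_from_iff (su : List Char) (i : Nat) :
    PySem.Chars.slice su (some (i : Int)) (some ((i : Int) + 4)) = "FROM".toList
      ↔ "FROM".toList <+: List.drop i su := by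
  have h4 : ((i : Int) + 4) = ((i : Int) + ((4 : Nat) : Int)) := by norm_num
  rw [h4]
  unfold PySem.Chars.slice
  rw [PySem.List.slice_natCast_add]
  rw [List.prefix_iff_eq_take]
  have : ("FROM".toList).length = 4 := rfl
  rw [this]
  exact ⟨fun h => h.symm, fun h => h.symm⟩

-- a character that does not uppercase to 'F' cannot start "FROM" in sql_u
theorem not_from_at (s : List Char) (i : Nat) (hi : i < s.length)
    (hne : PySem.Chars.upperChar s[i] ≠ 'F') :
    ¬ "FROM".toList <+: List.drop i (PySem.Chars.upper s) := by
  intro h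
  have hlen : i < (PySem.Chars.upper s).length := by
    simpa [PySem.Chars.upper] using hi
  rw [List.drop_eq_getElem_cons hlen] at h
  have hF : "FROM".toList = 'F' :: ['R', 'O', 'M'] := rfl
  rw [hF] at h
  have := (List.cons_prefix_cons.mp h).1
  have h2 : (PySem.Chars.upper s)[i] = PySem.Chars.upperChar s[i] := by
    simp [PySem.Chars.upper]
  exact hne (this.trans h2).symm

-- both ports end the same way once the scan index passes the end of the string
theorem loops_end (s : List Char) (start i : Nat) (d : Int) (hi : s.length ≤ i) :
    (if aLoop s (PySem.Chars.upper s) i d < 0 then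
        String.ofList (PySem.Chars.slice s (some (start : Int)) none)
      else String.ofList (PySem.Chars.slice s (some (start : Int)) (some (aLoop s (PySem.Chars.upper s) i d))))
      = bLoop s (PySem.Chars.upper s) start i := by
  have ha : aLoop s (PySem.Chars.upper s) i d = -1 := by
    rw [aLoop]
    rw [dif_neg (by omega)]
  rw [ha]
  rw [if_pos (by norm_num : (-1 : Int) < 0)]
  rw [bLoop]
  have hf : PySem.Chars.findFrom (PySem.Chars.upper s) "FROM".toList (i : Int) none = -1 :=
    findFrom_none_of_ge _ _ (by simpa [PySem.Chars.upper] using hi)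
  rw [hf]
  rw [dif_pos (by norm_num : (-1 : Int) < 0)]

-- core: A's fused depth-tracking scan and B's find-then-validate loop agree
theorem loops_eq (s : List Char) (start : Nat) : ∀ (k i : Nat) (d : Int),
    s.length - i ≤ k → start ≤ i →
    d = ((List.take (i - start) (List.drop start s)).count '(' : Int)
        - ((List.take (i - start) (List.drop start s)).count ')' : Int) →
    (if aLoop s (PySem.Chars.upper s) i d < 0 then
        String.ofList (PySem.Chars.slice s (some (start : Int)) none)
      else String.ofList (PySem.Chars.slice s (some (start : Int)) (some (aLoop s (PySem.Chars.upper s) i d))))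
      = bLoop s (PySem.Chars.upper s) start i := by
  intro k
  induction k with
  | zero =>
    intro i d hk _ _
    exact loops_end s start i d (by omega)
  | succ k ih =>
    intro i d hk hstart hinv
    by_cases hi : i < s.length
    · have hilen : i < (PySem.Chars.upper s).length := by simpa [PySem.Chars.upper] using hi
      have hcnew : ∀ c : Char, (List.take (i + 1 - start) (List.drop start s)).count c
          = (List.take (i - start) (List.drop start s)).count c + ([s[i]] : List Char).count c := by
        intro c
        rw [show i + 1 - start = (i - start) + 1 by omega, List.take_add_one]
        have hg : (List.drop start s)[i - start]? = some s[i] := by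
          rw [List.getElem?_drop, show start + (i - start) = i by omega]
          exact List.getElem?_eq_getElem hi
        rw [hg, List.count_append]
        rfl
      rw [aLoop, dif_pos hi]
      by_cases h1 : s[i] = '('
      · rw [if_pos h1]
        have hrec := ih (i + 1) (d + 1) (by omega) (by omega) (by
          rw [hcnew '(', hcnew ')', h1]
          push_cast
          simp
          omega)
        rw [hrec]
        have hnf : ¬ "FROM".toList <+: List.drop i (PySem.Chars.upper s) :=
          not_from_at s i hi (by rw [h1]; decide)
        exact (bLoop_step s (PySem.Chars.upper s) start i (findFrom_skip _ i hilen hnf)).symm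
      · rw [if_neg h1]
        by_cases h2 : s[i] = ')'
        · rw [if_pos h2]
          have hrec := ih (i + 1) (d - 1) (by omega) (by omega) (by
            rw [hcnew '(', hcnew ')', h2]
            push_cast
            simp
            omega)
          rw [hrec]
          have hnf : ¬ "FROM".toList <+: List.drop i (PySem.Chars.upper s) :=
            not_from_at s i hi (by rw [h2]; decide)
          exact (bLoop_step s (PySem.Chars.upper s) start i (findFrom_skip _ i hilen hnf)).symm
        · rw [if_neg h2]
          have hinv1 : d = ((List.take (i + 1 - start) (List.drop start s)).count '(' : Int)
              - ((List.take (i + 1 - start) (List.drop start s)).count ')' : Int) := by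
            rw [hcnew '(', hcnew ')']
            have c1 : ([s[i]] : List Char).count '(' = 0 := by simp [h1]
            have c2 : ([s[i]] : List Char).count ')' = 0 := by simp [h2]
            rw [c1, c2]
            push_cast
            omega
          have hsl : PySem.Chars.slice s (some (start : Int)) (some (i : Int))
              = List.take (i - start) (List.drop start s) := by
            unfold PySem.Chars.slice
            rw [PySem.List.slice_natCast]
          by_cases hfm : "FROM".toList <+: List.drop i (PySem.Chars.upper s)
          · have hslice : PySem.Chars.slice (PySem.Chars.upper s) (some (i : Int)) (some ((i : Int) + 4))
                = "FROM".toList := (slice_eq_from_iff _ i).mpr hfm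
            have hfind := findFrom_at (PySem.Chars.upper s) i (le_of_lt hilen) hfm
            have hcounts_iff : (PySem.Chars.count (PySem.Chars.slice s (some (start : Int)) (some (i : Int))) "(".toList
                = PySem.Chars.count (PySem.Chars.slice s (some (start : Int)) (some (i : Int))) ")".toList) ↔ d = 0 := by
              rw [hsl]
              rw [show "(".toList = ['('] from rfl, show ")".toList = [')'] from rfl]
              rw [count_single, count_single]
              omega
            have hnn : ¬ ((i : Int) < 0) := by omega
            conv_rhs => rw [bLoop]
            rw [hfind]
            rw [dif_neg hnn]
            simp only [Int.toNat_natCast]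
            by_cases hAc : d = 0 ∧ (PySem.Chars.slice (PySem.Chars.upper s) (some (i : Int)) (some ((i : Int) + 4)) = "FROM".toList)
                ∧ (i = 0 ∨ PySem.Chars.isalnum (s.getD (i - 1) ' ') = false)
            · rw [if_pos hAc]
              have hBc := hcounts_iff.mpr hAc.1
              rw [if_pos (And.intro hBc hAc.2.2)]
              rw [if_neg hnn]
            · rw [if_neg hAc]
              rw [ih (i + 1) d (by omega) (by omega) hinv1]
              have hBc : ¬ (PySem.Chars.count (PySem.Chars.slice s (some (start : Int)) (some (i : Int))) "(".toList
                  = PySem.Chars.count (PySem.Chars.slice s (some (start : Int)) (some (i : Int))) ")".toList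
                  ∧ (i = 0 ∨ PySem.Chars.isalnum (s.getD (i - 1) ' ') = false)) := by
                intro hh
                exact hAc ⟨hcounts_iff.mp hh.1, hslice, hh.2⟩
              rw [if_neg hBc]
          · have hslice_ne : ¬ (PySem.Chars.slice (PySem.Chars.upper s) (some (i : Int)) (some ((i : Int) + 4))
                = "FROM".toList) := fun hh => hfm ((slice_eq_from_iff _ _).mp hh)
            have hAc : ¬ (d = 0 ∧ (PySem.Chars.slice (PySem.Chars.upper s) (some (i : Int)) (some ((i : Int) + 4)) = "FROM".toList)
                ∧ (i = 0 ∨ PySem.Chars.isalnum (s.getD (i - 1) ' ') = false)) := fun hh => hslice_ne hh.2.1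
            rw [if_neg hAc]
            rw [ih (i + 1) d (by omega) (by omega) hinv1]
            exact (bLoop_step s (PySem.Chars.upper s) start i (findFrom_skip _ i hilen hfm)).symm
    · exact loops_end s start i d (by omega)

-- ===== VERDICT (by name: the statement is the Claim_ definition above) =====
theorem select_projection_py_spec : Claim_equal_select_projection_py := by
  intro sql _
  unfold Spec_select_projection_py select_projection_py select_projection_py_alt
  dsimp only
  by_cases hsel : PySem.Chars.find (PySem.Chars.upper sql.toList) "SELECT".toList < 0
  · rw [if_pos hsel, if_pos hsel]
  · rw [if_neg hsel, if_neg hsel]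
    have hcast : (((PySem.Chars.find (PySem.Chars.upper sql.toList) "SELECT".toList + 6)).toNat : Int)
        = PySem.Chars.find (PySem.Chars.upper sql.toList) "SELECT".toList + 6 :=
      Int.toNat_of_nonneg (by omega)
    rw [← hcast]
    simp only [Int.toNat_natCast]
    exact loops_eq sql.toList _ sql.toList.length _ 0 (by omega) le_rfl (by simp)
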